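-- pv_equiv track=rewrite | github.com/vmurashev/crystax-dev-utils | gen-boost-python-tests.py | get_tokens_from_section
-- ===== SOURCE A (Python) =====
-- def get_tokens_from_section(section_index, tokens):
--     result = []
--     current_section = 0
--     for tk in tokens:
--         if tk == ':':
--             current_section +=1
--             continue
--         elif current_section == section_index:
--             result.append(tk)
--         elif current_section > section_index:
--             break
--     return result
-- ===== SOURCE B (Python) =====
-- def get_tokens_from_section(section_index, tokens):
--     groups = []
--     cur = []
--     for tk in tokens:
--         if tk == ':':
--             groups.append(cur)
--             cur = []
--         else:
--             cur.append(tk)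
--     groups.append(cur)
--     if 0 <= section_index < len(groups):
--         return groups[section_index]
--     return []
-- ===== Notes on version B (the rewrite author's own statement) =====
-- stated objective: alternative
-- what changed: B first partitions the token list into per-section groups in one pass and then selects the requested group by a range-guarded index, instead of A's running section counter with a filtered append and early break.
import Mathlib
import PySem

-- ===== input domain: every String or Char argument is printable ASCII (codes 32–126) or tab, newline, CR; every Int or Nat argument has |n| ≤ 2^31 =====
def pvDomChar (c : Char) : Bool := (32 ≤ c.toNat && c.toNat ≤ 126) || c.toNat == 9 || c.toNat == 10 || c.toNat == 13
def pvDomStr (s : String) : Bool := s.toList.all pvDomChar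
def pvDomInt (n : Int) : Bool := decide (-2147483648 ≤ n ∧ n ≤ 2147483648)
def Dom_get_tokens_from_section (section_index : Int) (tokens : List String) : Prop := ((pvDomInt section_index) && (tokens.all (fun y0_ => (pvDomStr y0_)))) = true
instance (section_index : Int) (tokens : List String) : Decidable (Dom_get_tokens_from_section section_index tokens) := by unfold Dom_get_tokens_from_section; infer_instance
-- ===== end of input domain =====

-- B partitions the tokens into per-section groups in one pass, then selects the
-- requested group by a range-guarded index (alternative decomposition, same cost).

-- ===== PORT A =====
-- A's loop with the running counter, filtered append and early break.
def pvGoA (section_index : Int) : List String → Int → List String → List String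
  | [], _, result => result
  | tk :: rest, current_section, result =>
    if tk = ":" then pvGoA section_index rest (current_section + 1) result
    else if current_section = section_index then pvGoA section_index rest current_section (result ++ [tk])
    else if current_section > section_index then result   -- break
    else pvGoA section_index rest current_section result

def get_tokens_from_section (section_index : Int) (tokens : List String) : List String :=
  pvGoA section_index tokens 0 []

-- ===== PORT B =====
def pvStepB (s : List (List String) × List String) (tk : String) : List (List String) × List String :=
  if tk = ":" then (s.1 ++ [s.2], []) else (s.1, s.2 ++ [tk])

def get_tokens_from_section_alt (section_index : Int) (tokens : List String) : List String :=
  let s := tokens.foldl pvStepB ([], [])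
  let groups := s.1 ++ [s.2]
  if 0 ≤ section_index ∧ section_index < (groups.length : Int) then
    groups.getD section_index.toNat []
  else []

-- ===== PRECONDITION & SPEC =====
def Spec_get_tokens_from_section (section_index : Int) (tokens : List String) (out : List String) : Prop := out = get_tokens_from_section_alt section_index tokens
instance (section_index : Int) (tokens : List String) (out : List String) : Decidable (Spec_get_tokens_from_section section_index tokens out) := by unfold Spec_get_tokens_from_section; infer_instance

-- ===== CLAIM (what is proved, stated in full; the proofs are below) =====
def Claim_equal_get_tokens_from_section : Prop := ∀ (section_index : Int) (tokens : List String), Dom_get_tokens_from_section section_index tokens → Spec_get_tokens_from_section section_index tokens (get_tokens_from_section section_index tokens)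

-- ===== LEMMAS AND PROOFS =====

-- reference function: the tokens of section i (empty for i < 0 or i past the last section)
def pvSel (i : Int) : List String → List String
  | [] => []
  | tk :: rest =>
    if tk = ":" then pvSel (i - 1) rest
    else if i = 0 then tk :: pvSel i rest
    else pvSel i rest

theorem pvSel_neg (i : Int) (tokens : List String) (h : i < 0) : pvSel i tokens = [] := by
  induction tokens generalizing i with
  | nil => rfl
  | cons tk rest ih =>
    simp only [pvSel]
    split_ifs with h1 h2
    · exact ih (i - 1) (by omega)
    · omega
    · exact ih i h

theorem pvGoA_eq (i : Int) (tokens : List String) (cur : Int) (res : List String) :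
    pvGoA i tokens cur res = res ++ pvSel (i - cur) tokens := by
  induction tokens generalizing cur res with
  | nil => simp [pvGoA, pvSel]
  | cons tk rest ih =>
    simp only [pvGoA, pvSel]
    by_cases h1 : tk = ":"
    · rw [if_pos h1, if_pos h1, ih]
      congr 2
      ring
    · rw [if_neg h1, if_neg h1]
      by_cases h2 : cur = i
      · rw [if_pos h2, if_pos (by omega : i - cur = 0), ih]
        simp
      · rw [if_neg h2, if_neg (by omega : ¬ i - cur = 0)]
        by_cases h3 : cur > i
        · rw [if_pos h3, pvSel_neg _ _ (by omega)]
          simp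
        · rw [if_neg h3, ih]

-- the groups produced by B's fold, as a pure recursive function
def pvGrpFrom (c : List String) : List String → List (List String)
  | [] => [c]
  | tk :: rest => if tk = ":" then c :: pvGrpFrom [] rest else pvGrpFrom (c ++ [tk]) rest

theorem pvGrpFrom_length_pos (c : List String) (ts : List String) :
    0 < (pvGrpFrom c ts).length := by
  induction ts generalizing c with
  | nil => simp [pvGrpFrom]
  | cons tk rest ih =>
    simp only [pvGrpFrom]
    split_ifs
    · simp
    · exact ih _

theorem foldl_grpFrom (tokens : List String) (g : List (List String)) (c : List String) :
    (tokens.foldl pvStepB (g, c)).1 ++ [(tokens.foldl pvStepB (g, c)).2] = g ++ pvGrpFrom c tokens := by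
  induction tokens generalizing g c with
  | nil => simp [pvGrpFrom]
  | cons tk rest ih =>
    simp only [List.foldl_cons, pvStepB, pvGrpFrom]
    split_ifs with h <;> simp [ih]

theorem grpFrom_sel (tokens : List String) (c : List String) (i : Int) :
    (if 0 ≤ i ∧ i < ((pvGrpFrom c tokens).length : Int) then (pvGrpFrom c tokens).getD i.toNat [] else [])
      = if i = 0 then c ++ pvSel 0 tokens else pvSel i tokens := by
  induction tokens generalizing c i with
  | nil =>
    simp only [pvGrpFrom, List.length_singleton, Nat.cast_one]
    by_cases h0 : i = 0
    · subst h0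
      simp [pvSel]
    · rw [if_neg h0, if_neg (show ¬((0:Int) ≤ i ∧ i < 1) from by omega)]
      rfl
  | cons tk rest ih =>
    by_cases h : tk = ":"
    · subst h
      have hgrp : pvGrpFrom c (":" :: rest) = c :: pvGrpFrom [] rest := by
        simp [pvGrpFrom]
      have hsel : ∀ j : Int, pvSel j (":" :: rest) = pvSel (j - 1) rest := by
        intro j; simp [pvSel]
      have hGlen : (1 : Int) ≤ ((pvGrpFrom [] rest).length : Int) := by
        exact_mod_cast pvGrpFrom_length_pos [] rest
      have hlen : ((pvGrpFrom c (":" :: rest)).length : Int)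
          = ((pvGrpFrom [] rest).length : Int) + 1 := by
        rw [hgrp]; push_cast [List.length_cons]; ring
      rcases lt_trichotomy i 0 with hneg | hzero | hpos
      · rw [if_neg (show ¬ i = 0 from by omega),
          if_neg (show ¬(0 ≤ i ∧ i < ((pvGrpFrom c (":" :: rest)).length : Int)) from by omega),
          pvSel_neg _ _ hneg]
      · subst hzero
        rw [if_pos (show (0:Int) = 0 from rfl),
          if_pos (show (0:Int) ≤ 0 ∧ (0:Int) < ((pvGrpFrom c (":" :: rest)).length : Int) from
            ⟨le_refl 0, by omega⟩),
          hgrp, hsel, pvSel_neg _ _ (by norm_num : (0 : Int) - 1 < 0)]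
        simp
      · rw [if_neg (show ¬ i = 0 from by omega), hsel]
        by_cases hin : i < ((pvGrpFrom c (":" :: rest)).length : Int)
        · rw [if_pos (show 0 ≤ i ∧ i < ((pvGrpFrom c (":" :: rest)).length : Int) from
            ⟨by omega, hin⟩), hgrp]
          have ht : i.toNat = (i - 1).toNat + 1 := by omega
          have hih := ih [] (i - 1)
          rw [if_pos (show 0 ≤ i - 1 ∧ i - 1 < ((pvGrpFrom [] rest).length : Int) from
            ⟨by omega, by omega⟩)] at hih
          rw [ht, List.getD_cons_succ, hih]
          by_cases h0 : i - 1 = 0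
          · rw [if_pos h0, h0]; simp
          · rw [if_neg h0]
        · rw [if_neg (show ¬(0 ≤ i ∧ i < ((pvGrpFrom c (":" :: rest)).length : Int)) from
            fun hc => hin hc.2)]
          have hih := ih [] (i - 1)
          rw [if_neg (show ¬(0 ≤ i - 1 ∧ i - 1 < ((pvGrpFrom [] rest).length : Int)) from by omega),
            if_neg (show ¬ i - 1 = 0 from by omega)] at hih
          exact hih
    · have hgrp : pvGrpFrom c (tk :: rest) = pvGrpFrom (c ++ [tk]) rest := by
        simp [pvGrpFrom, h]
      rw [hgrp, ih (c ++ [tk]) i]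
      by_cases h0 : i = 0
      · rw [if_pos h0]
        simp [pvSel, h, h0]
      · rw [if_neg h0]
        simp [pvSel, h, h0]

-- ===== VERDICT (by name: the statement is the Claim_ definition above) =====
theorem get_tokens_from_section_spec : Claim_equal_get_tokens_from_section := by
  intro i tokens _
  show get_tokens_from_section i tokens = get_tokens_from_section_alt i tokens
  unfold get_tokens_from_section get_tokens_from_section_alt
  simp only []
  rw [pvGoA_eq, foldl_grpFrom tokens [] []]
  simp only [List.nil_append]
  rw [grpFrom_sel tokens [] i]
  by_cases h0 : i = 0
  · rw [if_pos h0, h0]; simp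
  · rw [if_neg h0]; simp
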